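-- pv_equiv track=rewrite | github.com/mbosc/slurm_nodeocc | view/styles.py | crsstyler
-- ===== SOURCE A (Python) =====
-- def crsstyler(color, string):
--     """
--     custom style formatting function for curses applications
--     """
--     strings = string.split('\n')
--     styles = {
--         'RED' : lambda x: '<*3~' + str(x) + ':*>',
--         'YELLOW' : lambda x: '<*4~' + str(x) + ':*>',
--         'GREEN' : lambda x: '<*5~' + str(x) + ':*>',
--         'MAGENTA' : lambda x: '<*6~' + str(x) + ':*>',
--         'BLUE' : lambda x: '<*7~' + str(x) + ':*>',
--
--         'LRED' : str,
--         'LYELLOW' : str,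
--         'LGREEN' : str,
--         'LMAGENTA' : str,
--         'LBLUE' : str,
--         'LCYAN' : str,
--         'LWHITE' : str,
--         'LBG_CYAN' : str,
--
--         'CYAN' : lambda x: '<*8~' + str(x) + ':*>',
--         'BG_CYAN': lambda x: '<*15~' + str(x) + ':*>',
--         'WHITE' : lambda x: '<*2~' + str(x) + ':*>',
--
--         'BG_RED':       lambda x: '<*10~' + str(x) + ':*>',
--         'BG_GREEN':     lambda x: '<*11~' + str(x) + ':*>',
--         'BG_YELLOW':    lambda x: '<*12~' + str(x) + ':*>',
--         'BG_MAGENTA':   lambda x: '<*13~' + str(x) + ':*>'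
--     }
--     return '\n'.join([styles[color](x) for x in strings])
-- ===== SOURCE B (Python) =====
-- _MARKERS = {
--     'RED': ('<*3~', ':*>'), 'YELLOW': ('<*4~', ':*>'), 'GREEN': ('<*5~', ':*>'),
--     'MAGENTA': ('<*6~', ':*>'), 'BLUE': ('<*7~', ':*>'),
--     'LRED': ('', ''), 'LYELLOW': ('', ''), 'LGREEN': ('', ''), 'LMAGENTA': ('', ''),
--     'LBLUE': ('', ''), 'LCYAN': ('', ''), 'LWHITE': ('', ''), 'LBG_CYAN': ('', ''),
--     'CYAN': ('<*8~', ':*>'), 'BG_CYAN': ('<*15~', ':*>'), 'WHITE': ('<*2~', ':*>'),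
--     'BG_RED': ('<*10~', ':*>'), 'BG_GREEN': ('<*11~', ':*>'),
--     'BG_YELLOW': ('<*12~', ':*>'), 'BG_MAGENTA': ('<*13~', ':*>'),
-- }
--
-- def crsstyler(color, string):
--     """
--     custom style formatting function for curses applications
--     """
--     pre, suf = _MARKERS[color]          # unknown color -> KeyError, as in A
--     # never builds the line list: rewrite each '\n' separator in place and
--     # wrap the whole string once
--     return pre + string.replace('\n', suf + '\n' + pre) + suf
-- ===== Notes on version B (the rewrite author's own statement) =====
-- stated objective: simpler
-- what changed: B never builds the list of lines: it looks up a (prefix, suffix) marker pair once and produces the result with a single str.replace that rewrites each newline separator into suffix+'\n'+prefix, wrapping the whole string once, instead of A's split / per-line closure map / join pipeline.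
import Mathlib
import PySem

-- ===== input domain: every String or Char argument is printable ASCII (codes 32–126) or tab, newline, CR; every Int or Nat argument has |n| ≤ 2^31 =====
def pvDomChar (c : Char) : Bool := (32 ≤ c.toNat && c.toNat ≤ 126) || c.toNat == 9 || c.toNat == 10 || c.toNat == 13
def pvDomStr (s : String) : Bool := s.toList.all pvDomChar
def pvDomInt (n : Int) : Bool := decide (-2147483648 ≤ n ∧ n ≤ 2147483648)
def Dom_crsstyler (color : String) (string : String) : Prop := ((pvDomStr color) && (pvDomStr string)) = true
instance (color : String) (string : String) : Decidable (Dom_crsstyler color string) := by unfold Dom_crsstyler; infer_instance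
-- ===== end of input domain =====

-- B drops A's split/map/join pipeline: one marker-pair lookup, then a single
-- str.replace rewriting each newline separator in place; simpler, not claimed faster.


-- ===== PORT A =====
-- the styles dict of A, in insertion order: colour name -> per-line closure
def crsstylerStyles : List (String × (String → String)) :=
  [ ("RED",        fun x => "<*3~" ++ x ++ ":*>"),
    ("YELLOW",     fun x => "<*4~" ++ x ++ ":*>"),
    ("GREEN",      fun x => "<*5~" ++ x ++ ":*>"),
    ("MAGENTA",    fun x => "<*6~" ++ x ++ ":*>"),
    ("BLUE",       fun x => "<*7~" ++ x ++ ":*>"),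
    ("LRED",       fun x => x),
    ("LYELLOW",    fun x => x),
    ("LGREEN",     fun x => x),
    ("LMAGENTA",   fun x => x),
    ("LBLUE",      fun x => x),
    ("LCYAN",      fun x => x),
    ("LWHITE",     fun x => x),
    ("LBG_CYAN",   fun x => x),
    ("CYAN",       fun x => "<*8~" ++ x ++ ":*>"),
    ("BG_CYAN",    fun x => "<*15~" ++ x ++ ":*>"),
    ("WHITE",      fun x => "<*2~" ++ x ++ ":*>"),
    ("BG_RED",     fun x => "<*10~" ++ x ++ ":*>"),
    ("BG_GREEN",   fun x => "<*11~" ++ x ++ ":*>"),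
    ("BG_YELLOW",  fun x => "<*12~" ++ x ++ ":*>"),
    ("BG_MAGENTA", fun x => "<*13~" ++ x ++ ":*>") ]

def crsstyler (color : String) (string : String) : String :=
  match PySem.Str.split? string "\n" with
  | none => ""           -- unreachable: separator "\n" is non-empty
  | some strings =>
    match crsstylerStyles.find? (fun p => p.1 == color) with
    | none => ""         -- KeyError in Python; excluded by Pre_
    | some (_, f) => PySem.Str.join "\n" (strings.map f)

-- ===== PORT B =====
-- B's static marker table: colour name -> (prefix, suffix) pair
def crsstylerMarkers : List (String × (String × String)) :=
  [ ("RED", ("<*3~", ":*>")), ("YELLOW", ("<*4~", ":*>")), ("GREEN", ("<*5~", ":*>")),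
    ("MAGENTA", ("<*6~", ":*>")), ("BLUE", ("<*7~", ":*>")),
    ("LRED", ("", "")), ("LYELLOW", ("", "")), ("LGREEN", ("", "")), ("LMAGENTA", ("", "")),
    ("LBLUE", ("", "")), ("LCYAN", ("", "")), ("LWHITE", ("", "")), ("LBG_CYAN", ("", "")),
    ("CYAN", ("<*8~", ":*>")), ("BG_CYAN", ("<*15~", ":*>")), ("WHITE", ("<*2~", ":*>")),
    ("BG_RED", ("<*10~", ":*>")), ("BG_GREEN", ("<*11~", ":*>")),
    ("BG_YELLOW", ("<*12~", ":*>")), ("BG_MAGENTA", ("<*13~", ":*>")) ]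

def crsstyler_alt (color : String) (string : String) : String :=
  match crsstylerMarkers.find? (fun p => p.1 == color) with
  | none => ""                    -- KeyError in Python; excluded by Pre_
  | some (_, pre, suf) =>
    pre ++ PySem.Str.replace string "\n" (suf ++ "\n" ++ pre) ++ suf

-- ===== PRECONDITION & SPEC =====
-- Pre_ excludes exactly the colour names absent from A's styles dict, on which A raises KeyError.
def Pre_crsstyler (color : String) (string : String) : Prop :=
  color ∈ ["RED", "YELLOW", "GREEN", "MAGENTA", "BLUE",
           "LRED", "LYELLOW", "LGREEN", "LMAGENTA", "LBLUE", "LCYAN", "LWHITE", "LBG_CYAN",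
           "CYAN", "BG_CYAN", "WHITE", "BG_RED", "BG_GREEN", "BG_YELLOW", "BG_MAGENTA"]
instance (color : String) (string : String) : Decidable (Pre_crsstyler color string) := by
  unfold Pre_crsstyler; infer_instance
def pvWitness_crsstyler : String × String := ("RED", "hi\nthere")

def Spec_crsstyler (color : String) (string : String) (out : String) : Prop := out = crsstyler_alt color string
instance (color : String) (string : String) (out : String) : Decidable (Spec_crsstyler color string out) := by unfold Spec_crsstyler; infer_instance

-- ===== CLAIM (what is proved, stated in full; the proofs are below) =====
def Claim_equal_crsstyler : Prop := ∀ (color : String) (string : String), Dom_crsstyler color string → Pre_crsstyler color string → Spec_crsstyler color string (crsstyler color string)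

-- ===== LEMMAS AND PROOFS =====

-- splitOn's worker never returns the empty list
lemma pv_go_ne_nil (sep : List Char) : ∀ (fuel : Nat) (l cur : List Char) (acc : List (List Char)),
    PySem.Chars.splitOn.go sep fuel l cur acc ≠ [] := by
  intro fuel
  induction fuel with
  | zero =>
    intro l cur acc
    rw [PySem.Chars.splitOn.go]
    simp
  | succ n ih =>
    intro l cur acc
    cases l with
    | nil =>
      rw [PySem.Chars.splitOn.go]
      · simp
      all_goals omega
    | cons c rest =>
      rw [PySem.Chars.splitOn.go]
      by_cases hp : sep.isPrefixOf (c :: rest) = true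
      · rw [if_pos hp]; exact ih _ _ _
      · rw [if_neg hp]; exact ih _ _ _

-- accumulator lemma for splitOn's worker
lemma pv_go_acc (sep : List Char) : ∀ (fuel : Nat) (l cur : List Char) (acc : List (List Char)),
    PySem.Chars.splitOn.go sep fuel l cur acc =
      acc.reverse ++ PySem.Chars.splitOn.go sep fuel l cur [] := by
  intro fuel
  induction fuel with
  | zero =>
    intro l cur acc
    rw [PySem.Chars.splitOn.go, PySem.Chars.splitOn.go]
    simp
  | succ n ih =>
    intro l cur acc
    cases l with
    | nil =>
      rw [PySem.Chars.splitOn.go, PySem.Chars.splitOn.go]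
      · simp
      all_goals omega
    | cons c rest =>
      rw [PySem.Chars.splitOn.go, PySem.Chars.splitOn.go]
      by_cases hp : sep.isPrefixOf (c :: rest) = true
      · rw [if_pos hp, if_pos hp, ih _ _ (cur.reverse :: acc), ih _ _ [cur.reverse]]
        simp
      · rw [if_neg hp, if_neg hp, ih _ _ acc]

-- the current-piece accumulator prepends (reversed) onto the head of the result
lemma pv_go_cur (sep : List Char) : ∀ (fuel : Nat) (l cur : List Char),
    PySem.Chars.splitOn.go sep fuel l cur [] =
      (cur.reverse ++ (PySem.Chars.splitOn.go sep fuel l [] []).headI) ::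
        (PySem.Chars.splitOn.go sep fuel l [] []).tail := by
  intro fuel
  induction fuel with
  | zero =>
    intro l cur
    rw [PySem.Chars.splitOn.go, PySem.Chars.splitOn.go]
    simp
  | succ n ih =>
    intro l cur
    cases l with
    | nil =>
      rw [PySem.Chars.splitOn.go, PySem.Chars.splitOn.go]
      · simp
      all_goals omega
    | cons c rest =>
      rw [PySem.Chars.splitOn.go, PySem.Chars.splitOn.go]
      by_cases hp : sep.isPrefixOf (c :: rest) = true
      · rw [if_pos hp, if_pos hp]
        simp only [List.reverse_nil]
        rw [pv_go_acc sep n _ [] [cur.reverse], pv_go_acc sep n _ [] [[]]]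
        simp
      · rw [if_neg hp, if_neg hp, ih rest (c :: cur), ih rest [c]]
        simp

-- accumulator lemma for replace's worker
lemma pv_rep_acc (old new : List Char) : ∀ (fuel : Nat) (l acc : List Char),
    PySem.Chars.replace.go old new fuel l acc =
      acc.reverse ++ PySem.Chars.replace.go old new fuel l [] := by
  intro fuel
  induction fuel with
  | zero =>
    intro l acc
    rw [PySem.Chars.replace.go, PySem.Chars.replace.go]
    simp
  | succ n ih =>
    intro l acc
    cases l with
    | nil =>
      rw [PySem.Chars.replace.go, PySem.Chars.replace.go]
      · simp
      all_goals omega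
    | cons c rest =>
      rw [PySem.Chars.replace.go, PySem.Chars.replace.go]
      by_cases hp : old.isPrefixOf (c :: rest) = true
      · rw [if_pos hp, if_pos hp]
        simp only [List.append_nil]
        rw [ih _ (new.reverse ++ acc), ih _ new.reverse]
        simp
      · rw [if_neg hp, if_neg hp, ih _ [c], ih _ (c :: acc)]
        simp

-- join with modified head
lemma pv_join_head (sep a x : List Char) (ys : List (List Char)) :
    PySem.Chars.join sep ((a ++ x) :: ys) = a ++ PySem.Chars.join sep (x :: ys) := by
  cases ys with
  | nil => simp [PySem.Chars.join_singleton]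
  | cons y t => simp [PySem.Chars.join_cons_cons, List.append_assoc]

-- joining with `new` the pieces splitOn's worker cuts at `old` IS replace's worker
lemma pv_rep_join (old new : List Char) (hold : old ≠ []) :
    ∀ (fuel : Nat) (l : List Char), l.length ≤ fuel →
    PySem.Chars.replace.go old new fuel l [] =
      PySem.Chars.join new (PySem.Chars.splitOn.go old (fuel + 1) l [] []) := by
  intro fuel
  induction fuel with
  | zero =>
    intro l hl
    have hnil : l = [] := List.eq_nil_of_length_eq_zero (Nat.le_zero.mp hl)
    subst hnil
    rw [PySem.Chars.replace.go, PySem.Chars.splitOn.go]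
    · simp [PySem.Chars.join_singleton]
    all_goals omega
  | succ n ih =>
    intro l hl
    cases l with
    | nil =>
      rw [PySem.Chars.replace.go, PySem.Chars.splitOn.go]
      · simp [PySem.Chars.join_singleton]
      all_goals omega
    | cons c rest =>
      rw [PySem.Chars.replace.go, PySem.Chars.splitOn.go]
      by_cases hp : old.isPrefixOf (c :: rest) = true
      · rw [if_pos hp, if_pos hp]
        have h1 : 1 ≤ old.length := by
          cases old with
          | nil => exact absurd rfl hold
          | cons _ _ => simp
        have hdl : (List.drop old.length (c :: rest)).length ≤ n := by
          simp only [List.length_drop, List.length_cons]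
          simp only [List.length_cons] at hl
          omega
        simp only [List.append_nil, List.reverse_nil]
        rw [pv_rep_acc old new n _ new.reverse, ih _ hdl,
            pv_go_acc old (n + 1) _ [] [[]]]
        have hne := pv_go_ne_nil old (n + 1) (List.drop old.length (c :: rest)) [] []
        cases hrest : PySem.Chars.splitOn.go old (n + 1) (List.drop old.length (c :: rest)) [] [] with
        | nil => exact absurd hrest hne
        | cons p ps =>
          simp [PySem.Chars.join_cons_cons]
      · rw [if_neg hp, if_neg hp]
        have hrl : rest.length ≤ n := by simpa using hl
        rw [pv_rep_acc old new n rest [c], ih rest hrl, pv_go_cur old (n + 1) rest [c]]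
        have hne := pv_go_ne_nil old (n + 1) rest [] []
        cases hrest : PySem.Chars.splitOn.go old (n + 1) rest [] [] with
        | nil => exact absurd hrest hne
        | cons p ps =>
          simpa using (pv_join_head new [c] p ps).symm

-- wrapping each piece and joining with sep = joining with suf++sep++pre and wrapping once
lemma pv_wrap (pre suf sep : List Char) : ∀ (parts : List (List Char)), parts ≠ [] →
    PySem.Chars.join sep (parts.map fun x => pre ++ x ++ suf) =
      pre ++ PySem.Chars.join (suf ++ sep ++ pre) parts ++ suf := by
  intro parts
  induction parts with
  | nil => intro h; exact absurd rfl h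
  | cons p ps ih =>
    intro _
    cases ps with
    | nil => simp [PySem.Chars.join_singleton]
    | cons q qs =>
      have hih := ih (by simp)
      simp only [List.map_cons] at hih
      rw [List.map_cons, List.map_cons, PySem.Chars.join_cons_cons, hih]
      simp [PySem.Chars.join_cons_cons, List.append_assoc]

-- master: A's per-line wrap-and-join equals B's single replace, wrapped once
lemma pv_master (pre suf s sep : List Char) (hsep : sep ≠ []) :
    PySem.Chars.join sep ((PySem.Chars.splitOn s sep).map fun x => pre ++ x ++ suf) =
      pre ++ PySem.Chars.replace s sep (suf ++ sep ++ pre) ++ suf := by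
  rw [PySem.Chars.replace, if_neg (by simpa [List.isEmpty_iff] using hsep),
      pv_rep_join sep (suf ++ sep ++ pre) hsep s.length s (le_refl _)]
  exact pv_wrap pre suf sep (PySem.Chars.splitOn s sep)
    (pv_go_ne_nil sep (s.length + 1) s [] [])

-- String-level form of pv_master, shaped like the two ports' branches
lemma pv_strmaster (pre suf string : String) :
    PySem.Str.join "\n" (List.map (fun x => pre ++ x ++ suf)
        (List.map String.ofList (PySem.Chars.splitOn string.toList "\n".toList))) =
      pre ++ PySem.Str.replace string "\n" (suf ++ "\n" ++ pre) ++ suf := by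
  apply String.toList_inj.mp
  have hm := pv_master pre.toList suf.toList string.toList ['\n'] (by decide)
  simp only [PySem.Str.toList_join, PySem.Str.toList_replace, String.toList_append,
             List.map_map, Function.comp_def, String.toList_ofList]
  simpa [Function.comp_def] using hm

-- the identity (light-colour) branch: str per line vs pre = suf = ''
lemma pv_strid (string : String) :
    PySem.Str.join "\n" (List.map (fun x => x)
        (List.map String.ofList (PySem.Chars.splitOn string.toList "\n".toList))) =
      "" ++ PySem.Str.replace string "\n" ("" ++ "\n" ++ "") ++ "" := by
  have h := pv_strmaster "" "" string
  simpa using h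

-- ===== VERDICT (by name: the statement is the Claim_ definition above) =====
set_option maxHeartbeats 8000000 in
theorem crsstyler_spec : Claim_equal_crsstyler := by
  intro color string _ pre
  unfold Spec_crsstyler
  simp only [Pre_crsstyler, List.mem_cons, List.not_mem_nil, or_false] at pre
  rcases pre with h|h|h|h|h|h|h|h|h|h|h|h|h|h|h|h|h|h|h|h
  · subst h
    simp only [crsstyler, crsstyler_alt, crsstylerStyles, crsstylerMarkers, List.find?,
               PySem.Str.split?, PySem.Chars.split?]
    rw [if_neg (by decide)]
    exact pv_strmaster "<*3~" ":*>" string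
  · subst h
    simp only [crsstyler, crsstyler_alt, crsstylerStyles, crsstylerMarkers, List.find?,
               PySem.Str.split?, PySem.Chars.split?]
    rw [if_neg (by decide)]
    exact pv_strmaster "<*4~" ":*>" string
  · subst h
    simp only [crsstyler, crsstyler_alt, crsstylerStyles, crsstylerMarkers, List.find?,
               PySem.Str.split?, PySem.Chars.split?]
    rw [if_neg (by decide)]
    exact pv_strmaster "<*5~" ":*>" string
  · subst h
    simp only [crsstyler, crsstyler_alt, crsstylerStyles, crsstylerMarkers, List.find?,
               PySem.Str.split?, PySem.Chars.split?]
    rw [if_neg (by decide)]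
    exact pv_strmaster "<*6~" ":*>" string
  · subst h
    simp only [crsstyler, crsstyler_alt, crsstylerStyles, crsstylerMarkers, List.find?,
               PySem.Str.split?, PySem.Chars.split?]
    rw [if_neg (by decide)]
    exact pv_strmaster "<*7~" ":*>" string
  · subst h
    simp only [crsstyler, crsstyler_alt, crsstylerStyles, crsstylerMarkers, List.find?,
               PySem.Str.split?, PySem.Chars.split?]
    rw [if_neg (by decide)]
    exact pv_strid string
  · subst h
    simp only [crsstyler, crsstyler_alt, crsstylerStyles, crsstylerMarkers, List.find?,
               PySem.Str.split?, PySem.Chars.split?]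
    rw [if_neg (by decide)]
    exact pv_strid string
  · subst h
    simp only [crsstyler, crsstyler_alt, crsstylerStyles, crsstylerMarkers, List.find?,
               PySem.Str.split?, PySem.Chars.split?]
    rw [if_neg (by decide)]
    exact pv_strid string
  · subst h
    simp only [crsstyler, crsstyler_alt, crsstylerStyles, crsstylerMarkers, List.find?,
               PySem.Str.split?, PySem.Chars.split?]
    rw [if_neg (by decide)]
    exact pv_strid string
  · subst h
    simp only [crsstyler, crsstyler_alt, crsstylerStyles, crsstylerMarkers, List.find?,
               PySem.Str.split?, PySem.Chars.split?]
    rw [if_neg (by decide)]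
    exact pv_strid string
  · subst h
    simp only [crsstyler, crsstyler_alt, crsstylerStyles, crsstylerMarkers, List.find?,
               PySem.Str.split?, PySem.Chars.split?]
    rw [if_neg (by decide)]
    exact pv_strid string
  · subst h
    simp only [crsstyler, crsstyler_alt, crsstylerStyles, crsstylerMarkers, List.find?,
               PySem.Str.split?, PySem.Chars.split?]
    rw [if_neg (by decide)]
    exact pv_strid string
  · subst h
    simp only [crsstyler, crsstyler_alt, crsstylerStyles, crsstylerMarkers, List.find?,
               PySem.Str.split?, PySem.Chars.split?]
    rw [if_neg (by decide)]
    exact pv_strid string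
  · subst h
    simp only [crsstyler, crsstyler_alt, crsstylerStyles, crsstylerMarkers, List.find?,
               PySem.Str.split?, PySem.Chars.split?]
    rw [if_neg (by decide)]
    exact pv_strmaster "<*8~" ":*>" string
  · subst h
    simp only [crsstyler, crsstyler_alt, crsstylerStyles, crsstylerMarkers, List.find?,
               PySem.Str.split?, PySem.Chars.split?]
    rw [if_neg (by decide)]
    exact pv_strmaster "<*15~" ":*>" string
  · subst h
    simp only [crsstyler, crsstyler_alt, crsstylerStyles, crsstylerMarkers, List.find?,
               PySem.Str.split?, PySem.Chars.split?]
    rw [if_neg (by decide)]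
    exact pv_strmaster "<*2~" ":*>" string
  · subst h
    simp only [crsstyler, crsstyler_alt, crsstylerStyles, crsstylerMarkers, List.find?,
               PySem.Str.split?, PySem.Chars.split?]
    rw [if_neg (by decide)]
    exact pv_strmaster "<*10~" ":*>" string
  · subst h
    simp only [crsstyler, crsstyler_alt, crsstylerStyles, crsstylerMarkers, List.find?,
               PySem.Str.split?, PySem.Chars.split?]
    rw [if_neg (by decide)]
    exact pv_strmaster "<*11~" ":*>" string
  · subst h
    simp only [crsstyler, crsstyler_alt, crsstylerStyles, crsstylerMarkers, List.find?,
               PySem.Str.split?, PySem.Chars.split?]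
    rw [if_neg (by decide)]
    exact pv_strmaster "<*12~" ":*>" string
  · subst h
    simp only [crsstyler, crsstyler_alt, crsstylerStyles, crsstylerMarkers, List.find?,
               PySem.Str.split?, PySem.Chars.split?]
    rw [if_neg (by decide)]
    exact pv_strmaster "<*13~" ":*>" string
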